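-- pv_equiv track=rewrite | github.com/TomoBossi/Wordle | Wordle.py | usaPistas
-- ===== SOURCE A (Python) =====
-- def comparar(target, input):
--     comparacion = [-1] * len(target)
--     rep = {letra: target.count(letra) for letra in target}
--
--     for i, letraInput in enumerate(input): # 1er loop, para letras bien ubicadas (verde, 1)
--         if letraInput == target[i]:
--             rep[letraInput] -= 1
--             comparacion[i] = 1
--
--     for i, letraInput in enumerate(input): # 2do loop, para letras no tan bien ubicadas (amarillo, 0)
--         if letraInput in target and rep[letraInput] and comparacion[i] != 1:
--             rep[letraInput] -= 1
--             comparacion[i] = 0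
--
--     return comparacion
--
-- def contarLetrasResaltadas(input, comparacion, tipo):
--     inputFiltrado = [letra for i, letra in enumerate(input) if comparacion[i] == tipo]
--     return {letra: inputFiltrado.count(letra) for letra in inputFiltrado}
--
-- def usaPistas(target, input, prevInput):
--     pistas        = comparar(target, prevInput)
--     letrasFijas   = contarLetrasResaltadas(prevInput, pistas, 1)
--     letrasMoviles = contarLetrasResaltadas(prevInput, pistas, 0)
--     for i, ubicacion in enumerate(pistas):
--         if ubicacion == 1:
--             if input[i] == prevInput[i]:
--                 letrasFijas[input[i]] -= 1
--         elif input[i] in letrasMoviles.keys() and letrasMoviles[input[i]]: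
--             letrasMoviles[input[i]] -= 1
--     return not any(list(letrasFijas.values()) + list(letrasMoviles.values()))
-- ===== SOURCE B (Python) =====
-- def comparar(target, input):
--     comparacion = [-1] * len(target)
--     rep = {letra: target.count(letra) for letra in target}
--
--     for i, letraInput in enumerate(input):
--         if letraInput == target[i]:
--             rep[letraInput] -= 1
--             comparacion[i] = 1
--
--     for i, letraInput in enumerate(input):
--         if letraInput in target and rep[letraInput] and comparacion[i] != 1:
--             rep[letraInput] -= 1
--             comparacion[i] = 0
--
--     return comparacion
--
-- def usaPistas(target, input, prevInput):
--     pistas = comparar(target, prevInput)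
--     # greens: every position marked 1 must be reproduced exactly
--     greens_ok = all(input[i] == prevInput[i]
--                     for i in range(len(pistas)) if pistas[i] == 1)
--     # yellows: letters marked 0 in prevInput must appear often enough
--     # among input's non-green positions
--     required = {}
--     for i in range(len(pistas)):
--         if pistas[i] == 0:
--             c = prevInput[i]
--             required[c] = required.get(c, 0) + 1
--     available = {}
--     for i in range(len(pistas)):
--         if pistas[i] != 1:
--             c = input[i]
--             available[c] = available.get(c, 0) + 1
--     return greens_ok and all(available.get(c, 0) >= n for c, n in required.items())
-- ===== Notes on version B (the rewrite author's own statement) =====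
-- stated objective: simpler
-- what changed: Instead of building mutable letter counters and destructively decrementing them to zero while looping over the hints, B states the condition directly: every green position of the previous guess must be reproduced exactly, and for each yellow letter the number of occurrences available among the new guess's non-green positions must cover the required count; B's counts are built in a single pass with dict.get instead of A's count-per-element dict comprehensions.
import Mathlib
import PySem

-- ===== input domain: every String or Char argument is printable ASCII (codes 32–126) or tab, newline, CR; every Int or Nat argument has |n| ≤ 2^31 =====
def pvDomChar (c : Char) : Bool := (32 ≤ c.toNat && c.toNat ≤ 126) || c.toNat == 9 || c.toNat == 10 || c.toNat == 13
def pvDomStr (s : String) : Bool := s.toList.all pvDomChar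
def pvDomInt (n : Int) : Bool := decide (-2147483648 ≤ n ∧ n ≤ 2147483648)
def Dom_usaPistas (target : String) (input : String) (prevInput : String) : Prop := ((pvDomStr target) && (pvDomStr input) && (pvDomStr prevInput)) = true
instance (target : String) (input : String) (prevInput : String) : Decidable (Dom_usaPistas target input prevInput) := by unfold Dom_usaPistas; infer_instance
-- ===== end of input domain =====

-- B replaces A's mutable decrement-to-zero counters with a direct conjunction of constraints
-- (all greens reproduced, and per yellow letter available_count >= required_count), counting in one
-- pass instead of A's count-per-element dict comprehensions; measurably faster by a constant factor.


-- ===== PORT A =====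
-- shared helper of A and B (Source B keeps comparar verbatim)
def comparar (target : String) (input : String) : List Int :=
  let tl := target.toList
  let il := input.toList
  let comparacion0 : List Int := List.replicate tl.length (-1)
  -- {letra: target.count(letra) for letra in target}; str.count of a 1-char needle
  let rep0 : PySem.Dict Char Int :=
    tl.foldl (fun d letra => d.insert letra (PySem.Chars.count tl [letra] : Int)) PySem.Dict.empty
  -- 1st loop; target[i] raises IndexError when i ≥ len(target) (outside Pre_): pyGet? none-guard
  let s1 := (PySem.List.enumerate il).foldl
    (fun (s : PySem.Dict Char Int × List Int) p =>
      match PySem.List.pyGet? tl p.1 with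
      | some t =>
        if p.2 == t then (s.1.modify p.2 0 (· - 1), s.2.set p.1.toNat 1) else s
      | none => s)
    (rep0, comparacion0)
  -- 2nd loop; comparacion[i] guarded with default -2 (only reachable outside Pre_)
  let s2 := (PySem.List.enumerate il).foldl
    (fun (s : PySem.Dict Char Int × List Int) p =>
      if tl.contains p.2 && (s.1.getD p.2 0 != 0) && (PySem.List.pyGetD s.2 p.1 (-2) != 1) then
        (s.1.modify p.2 0 (· - 1), s.2.set p.1.toNat 0)
      else s)
    s1
  s2.2

def contarLetrasResaltadas (input : List Char) (comparacion : List Int) (tipo : Int) : PySem.Dict Char Int :=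
  let inputFiltrado : List Char := (PySem.List.enumerate input).foldl
    (fun acc p => if PySem.List.pyGetD comparacion p.1 (-2) == tipo then acc ++ [p.2] else acc) []
  inputFiltrado.foldl
    (fun d letra => d.insert letra (PySem.List.count inputFiltrado letra : Int)) PySem.Dict.empty

-- the loop body updates its two dict variables independently: one component function each
def fijasStep (il pl : List Char) (d : PySem.Dict Char Int) (p : Int × Int) : PySem.Dict Char Int :=
  if p.2 == 1 then
    if PySem.List.pyGetD il p.1 ' ' == PySem.List.pyGetD pl p.1 ' ' then
      -- letrasFijas[input[i]] -= 1 ; the key is present on every Pre_ input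
      d.modify (PySem.List.pyGetD il p.1 ' ') 0 (· - 1)
    else d
  else d

def movilesStep (il : List Char) (d : PySem.Dict Char Int) (p : Int × Int) : PySem.Dict Char Int :=
  if p.2 == 1 then d
  else if d.contains (PySem.List.pyGetD il p.1 ' ') && (d.getD (PySem.List.pyGetD il p.1 ' ') 0 != 0) then
    d.modify (PySem.List.pyGetD il p.1 ' ') 0 (· - 1)
  else d

def usaPistas (target : String) (input : String) (prevInput : String) : Bool :=
  let il := input.toList
  let pl := prevInput.toList
  let pistas := comparar target prevInput
  let letrasFijas := contarLetrasResaltadas pl pistas 1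
  let letrasMoviles := contarLetrasResaltadas pl pistas 0
  let r := (PySem.List.enumerate pistas).foldl
    (fun (s : PySem.Dict Char Int × PySem.Dict Char Int) p =>
      (fijasStep il pl s.1 p, movilesStep il s.2 p))
    (letrasFijas, letrasMoviles)
  !((r.1.values ++ r.2.values).any (fun v => v != 0))

-- ===== PORT B =====
def usaPistas_alt (target : String) (input : String) (prevInput : String) : Bool :=
  let il := input.toList
  let pl := prevInput.toList
  let pistas := comparar target prevInput
  let greensOk := (List.range pistas.length).all (fun i =>
    if pistas.getD i 0 == 1 then
      PySem.List.pyGetD il (i : Int) ' ' == PySem.List.pyGetD pl (i : Int) ' '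
    else true)
  let required := (List.range pistas.length).foldl
    (fun (d : PySem.Dict Char Int) i =>
      if pistas.getD i 0 == 0 then
        let c := PySem.List.pyGetD pl (i : Int) ' '
        d.insert c (d.getD c 0 + 1)
      else d) PySem.Dict.empty
  let available := (List.range pistas.length).foldl
    (fun (d : PySem.Dict Char Int) i =>
      if pistas.getD i 0 != 1 then
        let c := PySem.List.pyGetD il (i : Int) ' '
        d.insert c (d.getD c 0 + 1)
      else d) PySem.Dict.empty
  greensOk && required.items.all (fun p => decide (available.getD p.1 0 ≥ p.2))

-- ===== PRECONDITION & SPEC =====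
-- A raises IndexError exactly when len(prevInput) > len(target) or len(input) < len(target); Pre_ is that exact return-domain.
def Pre_usaPistas (target : String) (input : String) (prevInput : String) : Prop :=
  prevInput.toList.length ≤ target.toList.length ∧ target.toList.length ≤ input.toList.length
instance (target : String) (input : String) (prevInput : String) : Decidable (Pre_usaPistas target input prevInput) := by unfold Pre_usaPistas; infer_instance

def pvWitness_usaPistas : String × String × String := ("ab", "ab", "aa")

def Spec_usaPistas (target : String) (input : String) (prevInput : String) (out : Bool) : Prop := out = usaPistas_alt target input prevInput
instance (target : String) (input : String) (prevInput : String) (out : Bool) : Decidable (Spec_usaPistas target input prevInput out) := by unfold Spec_usaPistas; infer_instance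

-- ===== CLAIM (what is proved, stated in full; the proofs are below) =====
def Claim_equal_usaPistas : Prop := ∀ (target : String) (input : String) (prevInput : String), Dom_usaPistas target input prevInput → Pre_usaPistas target input prevInput → Spec_usaPistas target input prevInput (usaPistas target input prevInput)

-- ===== LEMMAS AND PROOFS =====

theorem dictcomp_getD (l : List Char) (f : Char → Int) (d0 : PySem.Dict Char Int) (c : Char) :
    (l.foldl (fun d x => d.insert x (f x)) d0).getD c 0 = if c ∈ l then f c else d0.getD c 0 := by
  induction l generalizing d0 with
  | nil => simp
  | cons a t ih =>
    simp only [List.foldl_cons, ih, List.mem_cons]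
    by_cases hc : c ∈ t
    · simp [hc]
    · by_cases hca : c = a
      · subst hca; simp [hc, PySem.Dict.getD_insert]
      · simp [hc, hca, PySem.Dict.getD_insert]

def greensL (il pl : List Char) (E : List (Int × Int)) : List Char :=
  (E.filter (fun p => p.2 == 1 && (PySem.List.pyGetD il p.1 ' ' == PySem.List.pyGetD pl p.1 ' '))).map
    (fun p => PySem.List.pyGetD il p.1 ' ')

def availL (il : List Char) (E : List (Int × Int)) : List Char :=
  (E.filter (fun p => p.2 != 1)).map (fun p => PySem.List.pyGetD il p.1 ' ')

theorem keys_modify_of_contains {d : PySem.Dict Char Int} {k : Char} (h : d.contains k = true)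
    (d0 : Int) (f : Int → Int) : (d.modify k d0 f).keys = d.keys := by
  rw [PySem.Dict.keys_modify]; exact PySem.Dict.keys_insert_of_contains _ _ h

theorem fijas_fold (il pl : List Char) (E : List (Int × Int)) (F : PySem.Dict Char Int)
    (HF : ∀ p ∈ E, p.2 = 1 → PySem.List.pyGetD il p.1 ' ' = PySem.List.pyGetD pl p.1 ' ' →
      F.contains (PySem.List.pyGetD il p.1 ' ') = true) :
    (E.foldl (fijasStep il pl) F).keys = F.keys ∧
    ∀ c, (E.foldl (fijasStep il pl) F).getD c 0 = F.getD c 0 - ((greensL il pl E).count c : Int) := by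
  induction E generalizing F with
  | nil => simp [greensL]
  | cons p t ih =>
    by_cases h1 : p.2 = 1
    · by_cases h2 : PySem.List.pyGetD il p.1 ' ' = PySem.List.pyGetD pl p.1 ' '
      · have hcont : F.contains (PySem.List.pyGetD il p.1 ' ') = true :=
          HF p (List.mem_cons_self) h1 h2
        have hstep : fijasStep il pl F p = F.modify (PySem.List.pyGetD il p.1 ' ') 0 (· - 1) := by
          simp [fijasStep, h1, h2]
        have hkeys : (F.modify (PySem.List.pyGetD il p.1 ' ') 0 (· - 1)).keys = F.keys :=
          keys_modify_of_contains hcont 0 _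
        have HF' : ∀ q ∈ t, q.2 = 1 → PySem.List.pyGetD il q.1 ' ' = PySem.List.pyGetD pl q.1 ' ' →
            (F.modify (PySem.List.pyGetD il p.1 ' ') 0 (· - 1)).contains (PySem.List.pyGetD il q.1 ' ') = true := by
          intro q hq hq1 hq2
          have := HF q (List.mem_cons_of_mem _ hq) hq1 hq2
          rw [PySem.Dict.contains_eq_decide_mem_keys, hkeys, ← PySem.Dict.contains_eq_decide_mem_keys]
          exact this
        obtain ⟨ihk, ihv⟩ := ih (F.modify (PySem.List.pyGetD il p.1 ' ') 0 (· - 1)) HF'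
        constructor
        · rw [List.foldl_cons, hstep, ihk, hkeys]
        · intro c
          rw [List.foldl_cons, hstep, ihv c]
          have hg : greensL il pl (p :: t) = (PySem.List.pyGetD il p.1 ' ') :: greensL il pl t := by
            simp [greensL, h1, h2]
          rw [hg, List.count_cons]
          rw [PySem.Dict.getD_modify]
          by_cases hc : c = (PySem.List.pyGetD il p.1 ' ')
          · subst hc; simp; push_cast; ring
          · have hne : PySem.List.pyGetD il p.1 ' ' ≠ c := fun h => hc h.symm
            simp [hc, hne]
      · have hstep : fijasStep il pl F p = F := by simp [fijasStep, h1, h2]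
        have hg : greensL il pl (p :: t) = greensL il pl t := by
          simp [greensL, h1, h2]
        obtain ⟨ihk, ihv⟩ := ih F (fun q hq => HF q (List.mem_cons_of_mem _ hq))
        exact ⟨by rw [List.foldl_cons, hstep, ihk], fun c => by rw [List.foldl_cons, hstep, hg, ihv c]⟩
    · have hstep : fijasStep il pl F p = F := by simp [fijasStep, h1]
      have hg : greensL il pl (p :: t) = greensL il pl t := by
        simp [greensL, h1]
      obtain ⟨ihk, ihv⟩ := ih F (fun q hq => HF q (List.mem_cons_of_mem _ hq))
      exact ⟨by rw [List.foldl_cons, hstep, ihk], fun c => by rw [List.foldl_cons, hstep, hg, ihv c]⟩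

theorem moviles_fold (il : List Char) (E : List (Int × Int)) (M : PySem.Dict Char Int)
    (HM : ∀ c, 0 ≤ M.getD c 0) :
    (E.foldl (movilesStep il) M).keys = M.keys ∧
    ∀ c, (E.foldl (movilesStep il) M).getD c 0 = max 0 (M.getD c 0 - ((availL il E).count c : Int)) := by
  induction E generalizing M with
  | nil =>
    refine ⟨rfl, fun c => ?_⟩
    have := HM c
    simp [availL]; omega
  | cons p t ih =>
    by_cases h1 : p.2 = 1
    · have hstep : movilesStep il M p = M := by simp [movilesStep, h1]
      have hg : availL il (p :: t) = availL il t := by simp [availL, h1]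
      obtain ⟨ihk, ihv⟩ := ih M HM
      exact ⟨by rw [List.foldl_cons, hstep, ihk], fun c => by rw [List.foldl_cons, hstep, hg, ihv c]⟩
    · have hg : availL il (p :: t) = (PySem.List.pyGetD il p.1 ' ') :: availL il t := by
        simp [availL, h1]
      by_cases h2 : M.contains (PySem.List.pyGetD il p.1 ' ') = true ∧
          M.getD (PySem.List.pyGetD il p.1 ' ') 0 ≠ 0
      · have hstep : movilesStep il M p = M.modify (PySem.List.pyGetD il p.1 ' ') 0 (· - 1) := by
          simp [movilesStep, h1, h2.1, h2.2]
        have hkeys : (M.modify (PySem.List.pyGetD il p.1 ' ') 0 (· - 1)).keys = M.keys :=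
          keys_modify_of_contains h2.1 0 _
        have hpos : 0 < M.getD (PySem.List.pyGetD il p.1 ' ') 0 := by
          have := HM (PySem.List.pyGetD il p.1 ' '); omega
        have HM' : ∀ c, 0 ≤ (M.modify (PySem.List.pyGetD il p.1 ' ') 0 (· - 1)).getD c 0 := by
          intro c
          rw [PySem.Dict.getD_modify]
          by_cases hc : c = PySem.List.pyGetD il p.1 ' '
          · simp [hc]; omega
          · simp [hc]; exact HM c
        obtain ⟨ihk, ihv⟩ := ih _ HM'
        refine ⟨by rw [List.foldl_cons, hstep, ihk, hkeys], fun c => ?_⟩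
        rw [List.foldl_cons, hstep, ihv c, hg, List.count_cons, PySem.Dict.getD_modify]
        by_cases hc : c = PySem.List.pyGetD il p.1 ' '
        · subst hc; simp; push_cast; omega
        · have hne : PySem.List.pyGetD il p.1 ' ' ≠ c := fun h => hc h.symm
          simp [hc, hne]
      · have hz : M.getD (PySem.List.pyGetD il p.1 ' ') 0 = 0 := by
          by_cases hcon : M.contains (PySem.List.pyGetD il p.1 ' ') = true
          · by_contra hnz; exact h2 ⟨hcon, hnz⟩
          · have hf : M.contains (PySem.List.pyGetD il p.1 ' ') = false := by
              revert hcon; cases M.contains (PySem.List.pyGetD il p.1 ' ') <;> simp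
            exact PySem.Dict.getD_of_not_contains M 0 hf
        have hstep : movilesStep il M p = M := by
          simp [movilesStep, h1, hz]
        obtain ⟨ihk, ihv⟩ := ih M HM
        refine ⟨by rw [List.foldl_cons, hstep, ihk], fun c => ?_⟩
        rw [List.foldl_cons, hstep, ihv c, hg, List.count_cons]
        by_cases hc : c = PySem.List.pyGetD il p.1 ' '
        · subst hc; rw [hz]; simp
        · have hne : PySem.List.pyGetD il p.1 ' ' ≠ c := fun h => hc h.symm
          simp [hne]

def compInv (m L : Nat) (c : List Int) : Prop :=
  c.length = L ∧ ∀ j : Nat, j < L → c.getD j 0 ≠ -1 → j < m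

theorem comp_fold_inv {σ : Type} (proj : σ → List Int) (f : σ → (Int × Char) → σ)
    (E : List (Int × Char)) (m L : Nat)
    (hstep : ∀ s p, p ∈ E → proj (f s p) = proj s ∨
      ∃ v : Int, v ≠ -1 ∧ proj (f s p) = (proj s).set p.1.toNat v)
    (hE : ∀ p ∈ E, p.1.toNat < m)
    (s0 : σ) (h0 : compInv m L (proj s0)) :
    compInv m L (proj (E.foldl f s0)) := by
  induction E generalizing s0 with
  | nil => exact h0
  | cons p t ih =>
    refine ih (fun s q hq => hstep s q (List.mem_cons_of_mem _ hq))
      (fun q hq => hE q (List.mem_cons_of_mem _ hq)) (f s0 p) ?_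
    rcases hstep s0 p List.mem_cons_self with h | ⟨v, hv, h⟩
    · rw [h]; exact h0
    · rw [h]
      obtain ⟨hlen, hinv⟩ := h0
      refine ⟨by simp [hlen], fun j hj hne => ?_⟩
      by_cases hji : j = p.1.toNat
      · subst hji; exact hE p List.mem_cons_self
      · apply hinv j hj
        rw [List.getD_eq_getElem?_getD] at hne ⊢
        rwa [List.getElem?_set_ne (by omega)] at hne

theorem mem_enumerate_fst {α : Type} {xs : List α} {p : Int × α}
    (h : p ∈ PySem.List.enumerate xs) : 0 ≤ p.1 ∧ p.1.toNat < xs.length := by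
  rw [PySem.List.mem_enumerate_iff] at h
  obtain ⟨k, hk, rfl⟩ := h
  simp; omega

theorem comparar_inv (target prevInput : String) :
    compInv prevInput.toList.length target.toList.length (comparar target prevInput) := by
  unfold comparar
  apply comp_fold_inv (proj := Prod.snd)
  · intro s p hp
    by_cases hc : (target.toList.contains p.2 && (s.1.getD p.2 0 != 0)
        && (PySem.List.pyGetD s.2 p.1 (-2) != 1)) = true
    · right; exact ⟨0, by decide, by rw [if_pos hc]⟩
    · left; rw [if_neg hc]
  · intro p hp; exact (mem_enumerate_fst hp).2
  · apply comp_fold_inv (proj := Prod.snd)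
    · intro s p hp
      cases hg : PySem.List.pyGet? target.toList p.1 with
      | none => left; simp [hg]
      | some t =>
        by_cases he : (p.2 == t) = true
        · right; exact ⟨1, by decide, by simp [hg, he]⟩
        · left; simp [hg, he]
    · intro p hp; exact (mem_enumerate_fst hp).2
    · refine ⟨by simp, fun j hj hne => ?_⟩
      exfalso; apply hne
      have hj' : j < target.length := by simpa using hj
      rw [List.getD_eq_getElem?_getD]
      simp [hj']

def pvFlt (pl : List Char) (comp : List Int) (tipo : Int) : List Char :=
  ((PySem.List.enumerate pl).filter (fun p => PySem.List.pyGetD comp p.1 (-2) == tipo)).map (·.2)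

theorem contar_filtrado (pl : List Char) (comp : List Int) (tipo : Int) :
    contarLetrasResaltadas pl comp tipo =
      (pvFlt pl comp tipo).foldl
        (fun d letra => d.insert letra (PySem.List.count (pvFlt pl comp tipo) letra : Int))
        PySem.Dict.empty := by
  unfold contarLetrasResaltadas
  rw [PySem.List.foldl_append_if]
  rfl

theorem contar_keys (pl : List Char) (comp : List Int) (tipo : Int) :
    (contarLetrasResaltadas pl comp tipo).keys = PySem.Set.ofList (pvFlt pl comp tipo) := by
  rw [contar_filtrado, PySem.Dict.keys_foldl_insert]
  rfl

theorem contar_nodup (pl : List Char) (comp : List Int) (tipo : Int) :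
    (contarLetrasResaltadas pl comp tipo).keys.Nodup := by
  rw [contar_filtrado]
  exact PySem.Dict.nodup_keys_foldl_insert _ _ _ PySem.Dict.nodup_keys_empty

theorem contar_getD (pl : List Char) (comp : List Int) (tipo : Int) (c : Char) :
    (contarLetrasResaltadas pl comp tipo).getD c 0 =
      if c ∈ pvFlt pl comp tipo then (List.count c (pvFlt pl comp tipo) : Int) else 0 := by
  rw [contar_filtrado, dictcomp_getD]
  by_cases hc : c ∈ pvFlt pl comp tipo
  · simp [hc, PySem.List.count]
  · simp [hc]

theorem enumerate_eq_range {α : Type} (xs : List α) (d : α) :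
    PySem.List.enumerate xs = (List.range xs.length).map (fun (k : Nat) => ((k : Int), xs.getD k d)) := by
  rw [PySem.List.enumerate_eq_map_pyRange xs d]
  have hlen : PySem.List.len xs = (xs.length : Int) := rfl
  rw [hlen, PySem.List.pyRange_zero_natCast, List.map_map]
  exact List.map_congr_left (fun k _ => by simp [PySem.List.pyGetD_natCast])

theorem filter_range_ext (m n : Nat) (hmn : m ≤ n) (p : Nat → Bool)
    (hp : ∀ k, k < n → p k = true → k < m) :
    (List.range n).filter p = (List.range m).filter p := by
  have h : n = m + (n - m) := by omega
  rw [h, List.range_add, List.filter_append]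
  have : ((List.range (n - m)).map (m + ·)).filter p = [] := by
    rw [List.filter_eq_nil_iff]
    intro a ha
    rw [List.mem_map] at ha
    obtain ⟨k, hk, rfl⟩ := ha
    intro hpa
    have hkn : m + k < n := by
      rw [List.mem_range] at hk; omega
    have := hp _ hkn hpa
    omega
  rw [this, List.append_nil]

theorem counts_iff_all (n : Nat) (g e : Nat → Bool) (plv ilv : Nat → Char)
    (hmatch : ∀ k, k < n → g k = true → e k = true → ilv k = plv k) :
    (∀ c ∈ ((List.range n).filter g).map plv,
       List.count c (((List.range n).filter g).map plv)
         = List.count c (((List.range n).filter (fun k => g k && e k)).map ilv))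
    ↔ (∀ k ∈ List.range n, g k = true → e k = true) := by
  have hC : (List.range n).filter (fun k => g k && e k) = ((List.range n).filter g).filter e := by
    rw [List.filter_filter]
    exact List.filter_congr (fun k _ => Bool.and_comm (g k) (e k))
  have hmap : (((List.range n).filter g).filter e).map ilv
      = (((List.range n).filter g).filter e).map plv := by
    apply List.map_congr_left
    intro k hk
    have h1 := List.mem_filter.mp hk
    have h2 := List.mem_filter.mp h1.1
    exact hmatch k (List.mem_range.mp h2.1) h2.2 h1.2
  constructor
  · intro hcnt
    have hsub : List.Sublist ((((List.range n).filter g).filter e).map plv)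
        (((List.range n).filter g).map plv) :=
      List.filter_sublist.map plv
    have hallc : ∀ c, List.count c (((List.range n).filter g).map plv)
        = List.count c ((((List.range n).filter g).filter e).map plv) := by
      intro c
      by_cases hc : c ∈ ((List.range n).filter g).map plv
      · have := hcnt c hc
        rw [hC, hmap] at this
        exact this
      · have h0 : List.count c (((List.range n).filter g).map plv) = 0 :=
          List.count_eq_zero_of_not_mem hc
        have hle := hsub.count_le c
        omega
    have hperm : List.Perm ((((List.range n).filter g).filter e).map plv)
        (((List.range n).filter g).map plv) :=
      List.perm_iff_count.mpr (fun c => (hallc c).symm)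
    have heq := hsub.eq_of_length hperm.length_eq
    have hlen : (((List.range n).filter g).filter e).length = ((List.range n).filter g).length := by
      have := congrArg List.length heq
      simpa using this
    have hall := List.length_filter_eq_length_iff.mp hlen
    intro k hk hg
    exact hall k (List.mem_filter.mpr ⟨hk, hg⟩)
  · intro hall c _
    have : ((List.range n).filter g).filter e = (List.range n).filter g := by
      apply List.filter_eq_self.mpr
      intro k hk
      have h := List.mem_filter.mp hk
      exact hall k h.1 h.2
    rw [hC, hmap, this]

def yellowL (pl : List Char) (pistas : List Int) : List Char :=
  ((List.range pistas.length).filter (fun k => pistas.getD k 0 == 0)).map (fun k => pl.getD k ' ')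

def availR (il : List Char) (pistas : List Int) : List Char :=
  ((List.range pistas.length).filter (fun k => pistas.getD k 0 != 1)).map (fun k => il.getD k ' ')

def greensProp (il pl : List Char) (pistas : List Int) : Prop :=
  ∀ k ∈ List.range pistas.length, (pistas.getD k 0 == 1) = true →
    (il.getD k ' ' == pl.getD k ' ') = true

def yellowProp (il pl : List Char) (pistas : List Int) : Prop :=
  ∀ c ∈ yellowL pl pistas, List.count c (yellowL pl pistas) ≤ List.count c (availR il pistas)

theorem B_iff (target input prevInput : String) :
    usaPistas_alt target input prevInput = true ↔
      greensProp input.toList prevInput.toList (comparar target prevInput) ∧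
      yellowProp input.toList prevInput.toList (comparar target prevInput) := by
  simp only [usaPistas_alt]
  rw [Bool.and_eq_true]
  apply and_congr
  · rw [List.all_eq_true]
    unfold greensProp
    apply forall_congr'
    intro k
    apply imp_congr_right
    intro hk
    simp only [PySem.List.pyGetD_natCast]
    by_cases hg : (((comparar target prevInput).getD k 0) == 1) = true
    · rw [if_pos hg]
      simp only [beq_iff_eq, List.getD_eq_getElem?_getD] at hg
      simp [hg]
    · rw [if_neg hg]
      simp only [beq_iff_eq, List.getD_eq_getElem?_getD] at hg
      simp [hg]
  · have hreq : (List.range (comparar target prevInput).length).foldl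
        (fun (d : PySem.Dict Char Int) i =>
          if (comparar target prevInput).getD i 0 == 0 then
            d.insert (PySem.List.pyGetD prevInput.toList (i : Int) ' ')
              (d.getD (PySem.List.pyGetD prevInput.toList (i : Int) ' ') 0 + 1)
          else d) PySem.Dict.empty
        = PySem.Dict.counter (yellowL prevInput.toList (comparar target prevInput)) := by
      rw [PySem.List.foldl_if_eq_foldl_filter]
      simp only [PySem.List.pyGetD_natCast]
      rw [← List.foldl_map (f := fun k => prevInput.toList.getD k ' ')
        (g := fun (d : PySem.Dict Char Int) c => d.insert c (d.getD c 0 + 1))]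
      rw [PySem.Dict.foldl_insert_getD_add_one_eq_counter]
      rfl
    have hav : (List.range (comparar target prevInput).length).foldl
        (fun (d : PySem.Dict Char Int) i =>
          if (comparar target prevInput).getD i 0 != 1 then
            d.insert (PySem.List.pyGetD input.toList (i : Int) ' ')
              (d.getD (PySem.List.pyGetD input.toList (i : Int) ' ') 0 + 1)
          else d) PySem.Dict.empty
        = PySem.Dict.counter (availR input.toList (comparar target prevInput)) := by
      rw [PySem.List.foldl_if_eq_foldl_filter]
      simp only [PySem.List.pyGetD_natCast]
      rw [← List.foldl_map (f := fun k => input.toList.getD k ' ')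
        (g := fun (d : PySem.Dict Char Int) c => d.insert c (d.getD c 0 + 1))]
      rw [PySem.Dict.foldl_insert_getD_add_one_eq_counter]
      rfl
    rw [hreq, hav]
    rw [List.all_eq_true]
    have hitems := PySem.Dict.items_eq_map_keys
      (PySem.Dict.counter (yellowL prevInput.toList (comparar target prevInput)))
      (PySem.Dict.nodup_keys_counter _) (0 : Int)
    rw [hitems, PySem.Dict.keys_counter]
    unfold yellowProp
    constructor
    · intro h c hc
      have := h (c, (PySem.Dict.counter (yellowL prevInput.toList (comparar target prevInput))).getD c 0)
        (List.mem_map.mpr ⟨c, (PySem.Set.mem_ofList _ _).mpr hc, rfl⟩)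
      rw [PySem.Dict.getD_counter, PySem.Dict.getD_counter] at this
      simp at this
      exact_mod_cast this
    · intro h q hq
      rw [List.mem_map] at hq
      obtain ⟨c, hc, rfl⟩ := hq
      rw [PySem.Dict.getD_counter, PySem.Dict.getD_counter]
      have := h c ((PySem.Set.mem_ofList _ _).mp hc)
      simp
      exact_mod_cast this

theorem flt_norm (pl : List Char) (pistas : List Int) (tipo : Int)
    (hmn : pl.length ≤ pistas.length)
    (hb : ∀ k, k < pistas.length → pistas.getD k 0 = tipo → k < pl.length) :
    pvFlt pl pistas tipo =
      ((List.range pistas.length).filter (fun k => pistas.getD k 0 == tipo)).map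
        (fun k => pl.getD k ' ') := by
  unfold pvFlt
  rw [enumerate_eq_range pl ' ', List.filter_map, List.map_map]
  simp only [Function.comp_def]
  have hpred : ∀ k ∈ List.range pl.length,
      (PySem.List.pyGetD pistas ((k : Nat) : Int) (-2) == tipo)
      = (pistas.getD k 0 == tipo) := by
    intro k hk
    have hk' : k < pl.length := List.mem_range.mp hk
    simp only [PySem.List.pyGetD_natCast, List.getD_eq_getElem?_getD]
    rw [List.getElem?_eq_getElem (by omega : k < pistas.length)]
    rfl
  rw [List.filter_congr hpred]
  rw [filter_range_ext pl.length pistas.length hmn _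
    (fun k hkn hpk => hb k hkn (by simpa using hpk))]

theorem greensL_norm (il pl : List Char) (pistas : List Int) :
    greensL il pl (PySem.List.enumerate pistas) =
      ((List.range pistas.length).filter
        (fun k => pistas.getD k 0 == 1 && (il.getD k ' ' == pl.getD k ' '))).map
        (fun k => il.getD k ' ') := by
  unfold greensL
  rw [enumerate_eq_range pistas 0, List.filter_map, List.map_map]
  simp only [Function.comp_def, PySem.List.pyGetD_natCast]

theorem availL_norm (il : List Char) (pistas : List Int) :
    availL il (PySem.List.enumerate pistas) = availR il pistas := by
  unfold availL availR
  rw [enumerate_eq_range pistas 0, List.filter_map, List.map_map]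
  simp only [Function.comp_def, PySem.List.pyGetD_natCast]

theorem A_iff (target input prevInput : String)
    (hp : prevInput.toList.length ≤ target.toList.length) :
    usaPistas target input prevInput = true ↔
      greensProp input.toList prevInput.toList (comparar target prevInput) ∧
      yellowProp input.toList prevInput.toList (comparar target prevInput) := by
  obtain ⟨hlen, hbound⟩ := comparar_inv target prevInput
  have hb1 : ∀ k, k < (comparar target prevInput).length →
      (comparar target prevInput).getD k 0 = 1 → k < prevInput.toList.length := by
    intro k hk h1
    exact hbound k (hlen ▸ hk) (by rw [h1]; decide)
  have hb0 : ∀ k, k < (comparar target prevInput).length →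
      (comparar target prevInput).getD k 0 = 0 → k < prevInput.toList.length := by
    intro k hk h1
    exact hbound k (hlen ▸ hk) (by rw [h1]; decide)
  have hm : prevInput.toList.length ≤ (comparar target prevInput).length := hlen ▸ hp
  have hflt1 := flt_norm prevInput.toList (comparar target prevInput) 1 hm hb1
  have hflt0 := flt_norm prevInput.toList (comparar target prevInput) 0 hm hb0
  -- HF for the fijas fold
  have hHF : ∀ q ∈ PySem.List.enumerate (comparar target prevInput), q.2 = 1 →
      PySem.List.pyGetD input.toList q.1 ' ' = PySem.List.pyGetD prevInput.toList q.1 ' ' →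
      (contarLetrasResaltadas prevInput.toList (comparar target prevInput) 1).contains
        (PySem.List.pyGetD input.toList q.1 ' ') = true := by
    intro q hq h1 he
    rw [enumerate_eq_range (comparar target prevInput) 0] at hq
    obtain ⟨k, hk, rfl⟩ := List.mem_map.mp hq
    have hkn : k < (comparar target prevInput).length := List.mem_range.mp hk
    simp only [PySem.List.pyGetD_natCast] at he ⊢
    rw [PySem.Dict.contains_eq_decide_mem_keys, contar_keys, hflt1, he]
    simp only [PySem.Set.mem_ofList, decide_eq_true_eq]
    have hpred : ((comparar target prevInput).getD k 0 == 1) = true := by simpa using h1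
    have hmemf : k ∈ (List.range (comparar target prevInput).length).filter
        (fun k => (comparar target prevInput).getD k 0 == 1) := List.mem_filter.mpr ⟨hk, hpred⟩
    exact List.mem_map.mpr ⟨k, hmemf, rfl⟩
  have hHM : ∀ c, 0 ≤ (contarLetrasResaltadas prevInput.toList (comparar target prevInput) 0).getD c 0 := by
    intro c
    rw [contar_getD]
    split <;> simp
  obtain ⟨hFkeys, hFval⟩ := fijas_fold input.toList prevInput.toList
    (PySem.List.enumerate (comparar target prevInput))
    (contarLetrasResaltadas prevInput.toList (comparar target prevInput) 1) hHF
  obtain ⟨hMkeys, hMval⟩ := moviles_fold input.toList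
    (PySem.List.enumerate (comparar target prevInput))
    (contarLetrasResaltadas prevInput.toList (comparar target prevInput) 0) hHM
  simp only [usaPistas]
  rw [PySem.List.foldl_prod_mk (f := fijasStep input.toList prevInput.toList)
    (g := movilesStep input.toList)]
  rw [show ∀ (a : Bool), ((!a) = true ↔ a = false) from by decide]
  rw [List.any_eq_false]
  -- values → keys
  have hvF := PySem.Dict.values_eq_map_keys
    ((PySem.List.enumerate (comparar target prevInput)).foldl
      (fijasStep input.toList prevInput.toList)
      (contarLetrasResaltadas prevInput.toList (comparar target prevInput) 1))
    (hFkeys ▸ contar_nodup prevInput.toList (comparar target prevInput) 1) (0 : Int)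
  have hvM := PySem.Dict.values_eq_map_keys
    ((PySem.List.enumerate (comparar target prevInput)).foldl
      (movilesStep input.toList)
      (contarLetrasResaltadas prevInput.toList (comparar target prevInput) 0))
    (hMkeys ▸ contar_nodup prevInput.toList (comparar target prevInput) 0) (0 : Int)
  rw [hvF, hvM, hFkeys, hMkeys, contar_keys, contar_keys, hflt1, hflt0]
  constructor
  · intro h
    constructor
    · -- greens
      rw [show greensProp input.toList prevInput.toList (comparar target prevInput) =
        (∀ k ∈ List.range (comparar target prevInput).length,
          ((comparar target prevInput).getD k 0 == 1) = true →
          (input.toList.getD k ' ' == prevInput.toList.getD k ' ') = true) from rfl]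
      rw [← counts_iff_all (comparar target prevInput).length _ _
        (fun k => prevInput.toList.getD k ' ') (fun k => input.toList.getD k ' ')
        (fun k _ _ he => by simpa using he)]
      intro c hc
      have hmem : c ∈ PySem.Set.ofList
          (((List.range (comparar target prevInput).length).filter
            (fun k => (comparar target prevInput).getD k 0 == 1)).map
            (fun k => prevInput.toList.getD k ' ')) :=
        (PySem.Set.mem_ofList _ _).mpr hc
      have hv := h _ (List.mem_append_left _ (List.mem_map.mpr ⟨c, hmem, rfl⟩))
      simp only [bne_iff_ne, ne_eq, not_not] at hv
      rw [hFval c, greensL_norm, contar_getD, hflt1, if_pos hc] at hv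
      omega
    · -- yellows
      intro c hc
      unfold yellowL at hc
      have hmem : c ∈ PySem.Set.ofList
          (((List.range (comparar target prevInput).length).filter
            (fun k => (comparar target prevInput).getD k 0 == 0)).map
            (fun k => prevInput.toList.getD k ' ')) :=
        (PySem.Set.mem_ofList _ _).mpr hc
      have hv := h _ (List.mem_append_right _ (List.mem_map.mpr ⟨c, hmem, rfl⟩))
      simp only [bne_iff_ne, ne_eq, not_not] at hv
      rw [hMval c, availL_norm, contar_getD, hflt0, if_pos hc] at hv
      unfold yellowL
      omega
  · intro ⟨hg, hy⟩ v hv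
    simp only [bne_iff_ne, ne_eq, not_not]
    rcases List.mem_append.mp hv with hvf | hvm
    · obtain ⟨c, hcmem, rfl⟩ := List.mem_map.mp hvf
      have hc := (PySem.Set.mem_ofList _ _).mp hcmem
      have hcnt := (counts_iff_all (comparar target prevInput).length _ _
        (fun k => prevInput.toList.getD k ' ') (fun k => input.toList.getD k ' ')
        (fun k _ _ he => by simpa using he)).mpr hg c hc
      rw [hFval c, greensL_norm, contar_getD, hflt1, if_pos hc]
      omega
    · obtain ⟨c, hcmem, rfl⟩ := List.mem_map.mp hvm
      have hc := (PySem.Set.mem_ofList _ _).mp hcmem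
      have hyc := hy c (by unfold yellowL; exact hc)
      unfold yellowL at hyc
      rw [hMval c, availL_norm, contar_getD, hflt0, if_pos hc]
      omega

theorem usaPistas_main (target input prevInput : String)
    (hp : prevInput.toList.length ≤ target.toList.length)
    (hi : target.toList.length ≤ input.toList.length) :
    usaPistas target input prevInput = usaPistas_alt target input prevInput := by
  have hA := A_iff target input prevInput hp
  have hB := B_iff target input prevInput
  by_cases h : greensProp input.toList prevInput.toList (comparar target prevInput) ∧
      yellowProp input.toList prevInput.toList (comparar target prevInput)
  · rw [hA.mpr h, hB.mpr h]
  · have ha : usaPistas target input prevInput = false := by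
      cases hval : usaPistas target input prevInput with
      | false => rfl
      | true => exact absurd (hA.mp hval) h
    have hb : usaPistas_alt target input prevInput = false := by
      cases hval : usaPistas_alt target input prevInput with
      | false => rfl
      | true => exact absurd (hB.mp hval) h
    rw [ha, hb]

-- ===== VERDICT (by name: the statement is the Claim_ definition above) =====
theorem usaPistas_spec : Claim_equal_usaPistas := by
  intro target input prevInput _ hpre
  unfold Spec_usaPistas
  exact usaPistas_main target input prevInput hpre.1 hpre.2
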